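-- pv_equiv track=rewrite | github.com/zaslotskyi/QA__ | lesson22.py | lst2dict
-- ===== SOURCE A (Python) =====
-- def lst2dict(lst):
--
--     keys = []
--     values = []
--
--     for index, value in enumerate(lst):
--         if index % 2 == 0:
--             keys.append(value)
--         else:
--             values.append(value)
--
--     my_dict = dict(zip(keys, values))
--
--     return my_dict
-- ===== SOURCE B (Python) =====
-- def lst2dict(lst):
--     return {lst[i]: lst[i + 1] for i in range(0, len(lst) - 1, 2)}
-- ===== Notes on version B (the rewrite author's own statement) =====
-- stated objective: simpler
-- what changed: B builds the dict in one comprehension that pairs adjacent elements by step-2 indexing, eliminating A's parity branch, the two accumulator lists and the zip.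
import Mathlib
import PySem

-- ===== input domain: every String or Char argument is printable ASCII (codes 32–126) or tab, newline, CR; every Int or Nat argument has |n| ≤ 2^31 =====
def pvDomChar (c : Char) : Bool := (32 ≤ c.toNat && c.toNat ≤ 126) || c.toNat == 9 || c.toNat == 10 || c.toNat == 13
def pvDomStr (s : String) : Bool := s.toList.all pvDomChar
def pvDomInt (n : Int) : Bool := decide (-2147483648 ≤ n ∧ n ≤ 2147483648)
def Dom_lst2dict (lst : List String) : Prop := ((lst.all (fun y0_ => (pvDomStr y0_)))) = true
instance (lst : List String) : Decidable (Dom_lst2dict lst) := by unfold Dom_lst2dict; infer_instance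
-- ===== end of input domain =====

-- B replaces A's parity-branch accumulation + zip by a single step-2 index comprehension; objective: simpler.


-- ===== PORT A =====
-- literal port of A: enumerate loop filling keys/values by index parity, then dict(zip(keys, values))
def lst2dict (lst : List String) : List (String × String) :=
  let kv := (PySem.List.enumerate lst 0).foldl
    (fun (acc : List String × List String) p =>
      if PySem.Int.mod p.1 2 == 0 then (acc.1 ++ [p.2], acc.2) else (acc.1, acc.2 ++ [p.2]))
    ([], [])
  (PySem.Dict.ofList (kv.1.zip kv.2)).items

-- ===== PORT B =====
-- literal port of B: {lst[i]: lst[i+1] for i in range(0, len(lst)-1, 2)}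
-- (indices produced by the range are always in bounds, so pyGetD's default is never read)
def lst2dict_alt (lst : List String) : List (String × String) :=
  ((PySem.List.pyRange 0 ((lst.length : Int) - 1) 2).foldl
    (fun (d : PySem.Dict String String) i =>
      d.insert (PySem.List.pyGetD lst i "") (PySem.List.pyGetD lst (i + 1) ""))
    PySem.Dict.empty).items

-- ===== PRECONDITION & SPEC =====
def Spec_lst2dict (lst : List String) (out : List (String × String)) : Prop := out = lst2dict_alt lst
instance (lst : List String) (out : List (String × String)) : Decidable (Spec_lst2dict lst out) := by unfold Spec_lst2dict; infer_instance

-- ===== CLAIM (what is proved, stated in full; the proofs are below) =====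
def Claim_equal_lst2dict : Prop := ∀ (lst : List String), Dom_lst2dict lst → Spec_lst2dict lst (lst2dict lst)

-- ===== LEMMAS AND PROOFS =====

-- adjacent pairs of a list (a trailing unpaired element is dropped): the common value both ports build
def pvPairs : List String → List (String × String)
  | a :: b :: r => (a, b) :: pvPairs r
  | _ => []

-- zip truncates a right-exhausted left extension
lemma pvZipAppendLeft (ks vs t : List String) (h : vs.length ≤ ks.length) :
    (ks ++ t).zip vs = ks.zip vs := by
  induction ks generalizing vs with
  | nil =>
      cases vs with
      | nil => simp
      | cons v vs => simp at h
  | cons k ks ih =>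
      cases vs with
      | nil => simp
      | cons v vs => simp_all [List.zip]

-- B's index view of the pairs
lemma pvPairs_eq_index (lst : List String) :
    (List.range (lst.length / 2)).map
      (fun k => (lst.getD (2 * k) "", lst.getD (2 * k + 1) "")) = pvPairs lst := by
  induction lst using pvPairs.induct with
  | case1 a b r ih =>
      have hlen : (a :: b :: r).length / 2 = r.length / 2 + 1 := by
        simp [List.length_cons]; omega
      rw [hlen, List.range_succ_eq_map, List.map_cons, List.map_map]
      simp only [pvPairs]
      congr 1
  | case2 t h =>
      match t, h with
      | [], _ => simp [pvPairs]
      | [a], _ => simp [pvPairs]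
      | a :: b :: r, h => exact (h a b r rfl).elim

-- A's fold: zipping the two accumulators appends the adjacent pairs
lemma pvFoldA (lst : List String) : ∀ (ks vs : List String) (s : Int),
    ks.length = vs.length → (2 : Int) ∣ s →
    (((PySem.List.enumerate lst s).foldl
      (fun (acc : List String × List String) p =>
        if PySem.Int.mod p.1 2 == 0 then (acc.1 ++ [p.2], acc.2) else (acc.1, acc.2 ++ [p.2]))
      (ks, vs)).1.zip
     ((PySem.List.enumerate lst s).foldl
      (fun (acc : List String × List String) p =>
        if PySem.Int.mod p.1 2 == 0 then (acc.1 ++ [p.2], acc.2) else (acc.1, acc.2 ++ [p.2]))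
      (ks, vs)).2) = ks.zip vs ++ pvPairs lst := by
  induction lst using pvPairs.induct with
  | case1 a b r ih =>
      intro ks vs s hlen hdvd
      have hs : PySem.Int.mod s 2 = 0 := (PySem.Int.mod_eq_zero_iff_dvd s 2).mpr hdvd
      have hs1 : PySem.Int.mod (s + 1) 2 ≠ 0 := by
        intro h
        have := (PySem.Int.mod_eq_zero_iff_dvd (s + 1) 2).mp h
        omega
      rw [PySem.List.enumerate_cons, PySem.List.enumerate_cons]
      simp only [List.foldl_cons, hs, hs1, beq_iff_eq, if_pos, if_neg, not_false_iff]
      have ih' := ih (ks ++ [a]) (vs ++ [b]) (s + 1 + 1) (by simp [hlen]) (by omega)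
      simp only [beq_iff_eq] at ih'
      rw [ih']
      rw [List.zip_append hlen]
      simp [pvPairs]
  | case2 t h =>
      match t, h with
      | [], _ =>
          intro ks vs s hlen _
          simp [PySem.List.enumerate_nil, pvPairs]
      | [a], _ =>
          intro ks vs s hlen hdvd
          have hs : PySem.Int.mod s 2 = 0 := (PySem.Int.mod_eq_zero_iff_dvd s 2).mpr hdvd
          rw [PySem.List.enumerate_cons, PySem.List.enumerate_nil]
          simp only [List.foldl_cons, List.foldl_nil, beq_iff_eq]
          rw [if_pos hs]
          rw [pvZipAppendLeft ks vs [a] (le_of_eq hlen.symm)]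
          simp [pvPairs]
      | a :: b :: r, h => exact (h a b r rfl).elim

-- ===== VERDICT (by name: the statement is the Claim_ definition above) =====
theorem lst2dict_spec : Claim_equal_lst2dict := by
  intro lst _
  show lst2dict lst = lst2dict_alt lst
  have hA : lst2dict lst = (PySem.Dict.ofList (pvPairs lst)).items :=
    congrArg (fun l => (PySem.Dict.ofList l).items)
      (by simpa using pvFoldA lst [] [] 0 rfl ⟨0, rfl⟩)
  rw [hA]
  unfold lst2dict_alt
  rw [PySem.List.pyRange_of_pos 0 ((lst.length : Int) - 1) (by norm_num)]
  have hm : (if (0 : Int) < (lst.length : Int) - 1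
      then (((lst.length : Int) - 1 - 0 + 2 - 1) / 2).toNat else 0) = lst.length / 2 := by
    split <;> omega
  rw [hm, List.foldl_map]
  have hfun : (fun (d : PySem.Dict String String) (k : Nat) =>
        d.insert (PySem.List.pyGetD lst (0 + 2 * (k : Int)) "")
                 (PySem.List.pyGetD lst (0 + 2 * (k : Int) + 1) ""))
      = (fun (d : PySem.Dict String String) (k : Nat) =>
        d.insert (lst.getD (2 * k) "") (lst.getD (2 * k + 1) "")) := by
    funext d k
    have c1 : (0 : Int) + 2 * (k : Int) = ((2 * k : Nat) : Int) := by push_cast; ring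
    have c2 : ((2 * k : Nat) : Int) + 1 = ((2 * k + 1 : Nat) : Int) := by push_cast; ring
    rw [c1, c2, PySem.List.pyGetD_natCast, PySem.List.pyGetD_natCast]
  rw [hfun]
  rw [show PySem.Dict.ofList (pvPairs lst)
      = (pvPairs lst).foldl (fun d p => d.insert p.1 p.2) PySem.Dict.empty from rfl]
  rw [← pvPairs_eq_index lst, List.foldl_map]
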